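-- pv_equiv track=rewrite | github.com/laveenaBachani/Gutenberg | src/Utility.py | getFrequencyOfWord
-- ===== SOURCE A (Python) =====
-- def getFrequencyOfWord(text, word):
--     freq = []
--     words = text.split()
--     count = 0
--     for i in range(0,len(words)):
--         if(words[i] == "CHAPTER"):
--             freq.append(count)
--             count = 0
--         else:
--             if(words[i].lower() == word.lower()):
--                 count+=1
--     freq.append(count)
--     freq.pop(0)
--     return freq
-- ===== SOURCE B (Python) =====
-- def getFrequencyOfWord(text, word):
--     # Two-phase: partition words into chapter groups first, then count each group.
--     groups = [[]]
--     for w in text.split():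
--         if w == "CHAPTER":
--             groups.append([])
--         else:
--             groups[-1].append(w)
--     target = word.lower()
--     return [sum(1 for w in g if w.lower() == target) for g in groups[1:]]
-- ===== Notes on version B (the rewrite author's own statement) =====
-- stated objective: alternative
-- what changed: B partitions the word list into chapter groups first (discarding the pre-first-chapter group) and then counts the matching words in each group, instead of A's single online pass with a running counter that is flushed at each CHAPTER token.
import Mathlib
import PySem

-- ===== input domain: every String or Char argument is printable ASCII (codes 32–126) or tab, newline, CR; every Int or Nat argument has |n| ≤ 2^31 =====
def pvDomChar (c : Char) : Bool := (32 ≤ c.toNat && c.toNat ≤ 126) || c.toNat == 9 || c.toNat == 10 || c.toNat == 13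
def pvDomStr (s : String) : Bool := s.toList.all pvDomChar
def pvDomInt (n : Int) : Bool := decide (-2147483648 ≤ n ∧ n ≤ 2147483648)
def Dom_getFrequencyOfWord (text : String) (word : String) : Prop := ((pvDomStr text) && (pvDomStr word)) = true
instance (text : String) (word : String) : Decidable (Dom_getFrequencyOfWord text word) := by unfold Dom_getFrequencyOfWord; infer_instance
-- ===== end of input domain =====

-- B partitions the word list into chapter groups and then counts each group, instead of
-- A's single pass with a running counter; same behaviour, a two-phase alternative.

-- ===== PORT A =====
-- one loop step of A: on "CHAPTER" flush the counter, else count a case-insensitive match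
def pvAStep (word : String) (s : List Int × Int) (w : String) : List Int × Int :=
  if w = "CHAPTER" then (s.1 ++ [s.2], 0)
  else if PySem.Str.lower w = PySem.Str.lower word then (s.1, s.2 + 1) else s

def getFrequencyOfWord (text : String) (word : String) : List Int :=
  let words := PySem.Str.split₀ text
  let r := words.foldl (pvAStep word) ([], 0)
  -- freq.append(count); freq.pop(0)  (freq is nonempty after the append, so pop(0) = tail)
  (r.1 ++ [r.2]).tail

-- ===== PORT B =====
-- one loop step of B: on "CHAPTER" open a new group, else append the word to the last group
def pvBStep (s : List (List String)) (w : String) : List (List String) :=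
  if w = "CHAPTER" then s ++ [[]]
  else s.dropLast ++ [(s.getLastD []) ++ [w]]

def getFrequencyOfWord_alt (text : String) (word : String) : List Int :=
  let words := PySem.Str.split₀ text
  let groups := words.foldl pvBStep [[]]
  let target := PySem.Str.lower word
  (groups.drop 1).map (fun g => ((g.countP (fun w => PySem.Str.lower w = target)) : Int))

-- ===== PRECONDITION & SPEC =====
def Spec_getFrequencyOfWord (text : String) (word : String) (out : List Int) : Prop := out = getFrequencyOfWord_alt text word
instance (text : String) (word : String) (out : List Int) : Decidable (Spec_getFrequencyOfWord text word out) := by unfold Spec_getFrequencyOfWord; infer_instance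

-- ===== CLAIM (what is proved, stated in full; the proofs are below) =====
def Claim_equal_getFrequencyOfWord : Prop := ∀ (text : String) (word : String), Dom_getFrequencyOfWord text word → Spec_getFrequencyOfWord text word (getFrequencyOfWord text word)

-- ===== LEMMAS AND PROOFS =====

-- A's freq list only grows at the end: the fold from (f, c) is the fold from ([], c) with f prepended
lemma pvAfold_append (word : String) (ws : List String) (f : List Int) (c : Int) :
    ws.foldl (pvAStep word) (f, c)
      = (f ++ (ws.foldl (pvAStep word) ([], c)).1, (ws.foldl (pvAStep word) ([], c)).2) := by
  induction ws generalizing f c with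
  | nil => simp
  | cons w ws ih =>
    simp only [List.foldl_cons, pvAStep]
    split_ifs with h1 h2
    · simp only [List.nil_append]
      rw [ih [c] 0, ih (f ++ [c]) 0]; simp
    · exact ih f (c + 1)
    · exact ih f c

-- one B step on a group list ending in group g leaves the finished prefix untouched
lemma pvBStep_concat (gs : List (List String)) (g : List String) (w : String) :
    pvBStep (gs ++ [g]) w = gs ++ pvBStep [g] w := by
  unfold pvBStep; split_ifs <;> simp

-- B's fold only touches the last group: a prefix of finished groups passes through unchanged
lemma pvBfold_concat (ws : List String) (gs : List (List String)) (g : List String) :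
    ws.foldl pvBStep (gs ++ [g]) = gs ++ ws.foldl pvBStep [g] := by
  induction ws generalizing gs g with
  | nil => rfl
  | cons w ws ih =>
    simp only [List.foldl_cons]
    by_cases h : w = "CHAPTER"
    · have e : pvBStep [g] w = [g] ++ [[]] := by simp [pvBStep, h]
      rw [pvBStep_concat, e, ← List.append_assoc, ih, ih [g] [], List.append_assoc]
    · have e : pvBStep [g] w = [] ++ [g ++ [w]] := by simp [pvBStep, h]
      rw [pvBStep_concat, e, ← List.append_assoc, ih, ih [] (g ++ [w])]
      simp

-- the key correspondence: A's flushed counts plus the live counter = the counts of B's groups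
lemma pvMain (word : String) (ws : List String) (c : Int) (g : List String)
    (hc : c = (g.countP (fun w => PySem.Str.lower w = PySem.Str.lower word) : Int)) :
    (ws.foldl (pvAStep word) ([], c)).1 ++ [(ws.foldl (pvAStep word) ([], c)).2]
      = (ws.foldl pvBStep [g]).map
          (fun g => ((g.countP (fun w => PySem.Str.lower w = PySem.Str.lower word)) : Int)) := by
  induction ws generalizing c g with
  | nil => simp [hc]
  | cons w ws ih =>
    simp only [List.foldl_cons]
    by_cases h1 : w = "CHAPTER"
    · have ea : pvAStep word ([], c) w = ([c], 0) := by simp [pvAStep, h1]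
      have eb : pvBStep [g] w = [g] ++ [[]] := by simp [pvBStep, h1]
      rw [ea, eb, pvBfold_concat ws [g] [], pvAfold_append word ws [c] 0]
      simp only [List.map_append]
      rw [← ih 0 [] (by simp)]
      simp [hc]
    · by_cases h2 : PySem.Str.lower w = PySem.Str.lower word
      · have ea : pvAStep word ([], c) w = ([], c + 1) := by simp [pvAStep, h1, h2]
        have eb : pvBStep [g] w = [g ++ [w]] := by simp [pvBStep, h1]
        rw [ea, eb]
        exact ih (c + 1) (g ++ [w])
          (by simp [List.countP_append, h2, hc])
      · have ea : pvAStep word ([], c) w = ([], c) := by simp [pvAStep, h1, h2]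
        have eb : pvBStep [g] w = [g ++ [w]] := by simp [pvBStep, h1]
        rw [ea, eb]
        exact ih c (g ++ [w])
          (by simp [List.countP_append, h2, hc])

-- ===== VERDICT (by name: the statement is the Claim_ definition above) =====
theorem getFrequencyOfWord_spec : Claim_equal_getFrequencyOfWord := by
  intro text word _
  show (((PySem.Str.split₀ text).foldl (pvAStep word) ([], 0)).1
          ++ [((PySem.Str.split₀ text).foldl (pvAStep word) ([], 0)).2]).tail
      = (((PySem.Str.split₀ text).foldl pvBStep [[]]).drop 1).map
          (fun g => ((g.countP (fun w => PySem.Str.lower w = PySem.Str.lower word)) : Int))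
  rw [pvMain word _ 0 [] (by simp)]
  simp [List.drop_one]
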